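-- pv_equiv track=rewrite | github.com/p1nkpl4typus/aoc | aoc-2023/day-1/cali2.py | custom_parser
-- ===== SOURCE A (Python) =====
-- digits_dict = {
--   'one': '1',
--   'two': '2',
--   'three': '3',
--   'four': '4',
--   'five': '5',
--   'six': '6',
--   'seven': '7',
--   'eight': '8',
--   'nine': '9'
-- }
--
-- def custom_parser(string):
--     output = []
--     for start in range(len(string)):
--         found = False
--         if string[start].isdigit():
--             output.append(int(string[start]))
--             continue
--         for end in range(start + 1, len(string) + 1):
--             sub_str = string[start:end]
--             if sub_str in digits_dict:
--                 output.append(int(digits_dict[sub_str]))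
--                 found = True
--                 break
--         if found:
--             continue
--     return output
-- ===== SOURCE B (Python) =====
-- digits_dict = {
--   'one': '1',
--   'two': '2',
--   'three': '3',
--   'four': '4',
--   'five': '5',
--   'six': '6',
--   'seven': '7',
--   'eight': '8',
--   'nine': '9'
-- }
--
-- def custom_parser(string):
--     output = []
--     for start, c in enumerate(string):
--         if c.isdigit():
--             output.append(int(c))
--             continue
--         for word, digit in digits_dict.items():
--             if string.startswith(word, start):
--                 output.append(int(digit))
--                 break
--     return output
-- ===== Notes on version B (the rewrite author's own statement) =====
-- stated objective: faster
-- what changed: The inner search no longer enumerates ever-longer substrings string[start:end] for every end up to len(string) with a dict-membership test on each; instead it tests the nine fixed spelled-digit words with string.startswith(word, start) (no substring objects, at most nine prefix tests per position), and the outer loop uses enumerate instead of range+indexing.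
import Mathlib
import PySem

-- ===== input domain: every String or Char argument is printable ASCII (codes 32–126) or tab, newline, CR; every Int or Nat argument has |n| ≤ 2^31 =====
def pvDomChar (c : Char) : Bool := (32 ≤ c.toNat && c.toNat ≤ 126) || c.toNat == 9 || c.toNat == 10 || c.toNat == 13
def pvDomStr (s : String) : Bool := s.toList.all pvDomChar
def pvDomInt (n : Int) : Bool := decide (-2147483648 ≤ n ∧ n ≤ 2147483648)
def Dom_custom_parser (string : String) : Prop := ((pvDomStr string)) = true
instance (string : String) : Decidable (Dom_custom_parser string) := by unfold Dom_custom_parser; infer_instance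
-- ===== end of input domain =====

-- B replaces A's inner enumeration of growing substrings (with a dict membership test on
-- each) by at most nine startswith tests against the fixed spelled-digit words, and drives
-- the outer loop by enumerate; same return value on every input.

-- the module constant digits_dict (shared by both programs)
def cpDigits : PySem.Dict (List Char) (List Char) :=
  PySem.Dict.ofList
    [(['o','n','e'], ['1']), (['t','w','o'], ['2']), (['t','h','r','e','e'], ['3']),
     (['f','o','u','r'], ['4']), (['f','i','v','e'], ['5']), (['s','i','x'], ['6']),
     (['s','e','v','e','n'], ['7']), (['e','i','g','h','t'], ['8']), (['n','i','n','e'], ['9'])]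

-- ===== PORT A =====
-- A's inner loop: for end in range(start+1, len+1): if string[start:end] in digits_dict:
-- append int(digits_dict[sub]) and break  (the 'found' flag only guards a final no-op 'continue')
def cpFindA (l : List Char) (start : Int) : List Int → Option Int
  | [] => none
  | e :: rest =>
    match PySem.Dict.get? cpDigits (PySem.List.slice l (some start) (some e)) with
    | some v => PySem.Int.ofChars? v   -- int(digits_dict[sub_str]); the stored value is '1'..'9'
    | none => cpFindA l start rest

def custom_parser (string : String) : List Int :=
  let l := string.toList
  (PySem.List.pyRange 0 (l.length : Int)).foldl (fun output start =>
    match PySem.List.pyGet? l start with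
    | none => output             -- unreachable: 0 ≤ start < len(string)
    | some c =>
      if PySem.Chars.isdigit c then
        match PySem.Int.ofChars? [c] with  -- int(string[start]); guarded by isdigit
        | some d => output ++ [d]
        | none => output         -- unreachable: c is a digit
      else
        match cpFindA l start (PySem.List.pyRange (start + 1) ((l.length : Int) + 1)) with
        | some d => output ++ [d]
        | none => output) []

-- ===== PORT B =====
-- B's inner loop: for word, digit in digits_dict.items(): if string.startswith(word, start):
-- append int(digit) and break.  startswith(word, start) with 0 ≤ start is exactly the prefix
-- test on the suffix string[start:], ported as startswith on (l.drop start).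
def cpFindB (suffix : List Char) : List (List Char × List Char) → Option Int
  | [] => none
  | (word, digit) :: rest =>
    if PySem.Chars.startswith suffix word then PySem.Int.ofChars? digit
    else cpFindB suffix rest

def custom_parser_alt (string : String) : List Int :=
  let l := string.toList
  (PySem.List.enumerate l 0).foldl (fun output sc =>
    if PySem.Chars.isdigit sc.2 then
      match PySem.Int.ofChars? [sc.2] with
      | some d => output ++ [d]
      | none => output           -- unreachable: sc.2 is a digit
    else
      match cpFindB (l.drop sc.1.toNat) cpDigits.items with
      | some d => output ++ [d]
      | none => output) []


-- ===== PRECONDITION & SPEC =====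
def Spec_custom_parser (string : String) (out : List Int) : Prop := out = custom_parser_alt string
instance (string : String) (out : List Int) : Decidable (Spec_custom_parser string out) := by unfold Spec_custom_parser; infer_instance

-- ===== CLAIM (what is proved, stated in full; the proofs are below) =====
def Claim_equal_custom_parser : Prop := ∀ (string : String), Dom_custom_parser string → Spec_custom_parser string (custom_parser string)

-- ===== LEMMAS AND PROOFS =====

def cpScan (s : List Char) (k : Nat) : Nat → Option Int
  | 0 => none
  | n + 1 =>
    match PySem.Dict.get? cpDigits (s.take k) with
    | some v => PySem.Int.ofChars? v
    | none => cpScan s (k + 1) n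

theorem cpFindA_eq_cpScan (l : List Char) (start : Nat) (n : Nat) : ∀ k : Nat,
    cpFindA l (start : Int) (PySem.List.pyRange ((start : Int) + k) ((start : Int) + k + n)) =
      cpScan (l.drop start) k n := by
  induction n with
  | zero =>
    intro k
    rw [PySem.List.pyRange_one_eq_nil (by omega)]
    rfl
  | succ n ih =>
    intro k
    rw [PySem.List.pyRange_one_cons (by omega)]
    have hsl : PySem.List.slice l (some (start:Int)) (some ((start:Int)+(k:Int))) =
        (l.drop start).take k := by
      have := PySem.List.slice_natCast l start (start + k)
      push_cast at this
      rw [this]; congr 1; omega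
    simp only [cpFindA, hsl, cpScan]
    cases PySem.Dict.get? cpDigits ((l.drop start).take k) with
    | some v => rfl
    | none =>
      simp only
      have := ih (k+1)
      push_cast at this
      convert this using 3
      omega

theorem cpScan_none (s : List Char) (h : ∀ w v, (w, v) ∈ cpDigits.items → ¬ w <+: s) :
    ∀ n k, cpScan s k n = none := by
  intro n
  induction n with
  | zero => intro k; rfl
  | succ n ih =>
    intro k
    simp only [cpScan]
    cases hg : PySem.Dict.get? cpDigits (s.take k) with
    | some v =>
      exact absurd (List.take_prefix k s)
        (h _ _ (PySem.Dict.mem_items_of_get?_eq_some (d := cpDigits) hg))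
    | none => exact ih (k+1)

theorem cpScan_eq_cpFindB (s : List Char) :
    cpScan s 1 s.length = cpFindB s cpDigits.items := by
  show cpScan s 1 s.length = cpFindB s [(['o','n','e'], ['1']), (['t','w','o'], ['2']), (['t','h','r','e','e'], ['3']), (['f','o','u','r'], ['4']), (['f','i','v','e'], ['5']), (['s','i','x'], ['6']), (['s','e','v','e','n'], ['7']), (['e','i','g','h','t'], ['8']), (['n','i','n','e'], ['9'])]
  simp only [cpFindB]
  split_ifs with h1 h2 h3 h4 h5 h6 h7 h8 h9
  · obtain ⟨t, rfl⟩ := (PySem.Chars.startswith_iff _ _).mp h1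
    have hl : ((['o','n','e'] ++ t).length) = t.length + 3 := by simp
    rw [hl]
    simp [cpScan,
    show PySem.Dict.get? cpDigits ['o'] = none by decide,
    show PySem.Dict.get? cpDigits ['o','n'] = none by decide,
    show PySem.Dict.get? cpDigits ['o','n','e'] = some ['1'] by decide]
  · obtain ⟨t, rfl⟩ := (PySem.Chars.startswith_iff _ _).mp h2
    have hl : ((['t','w','o'] ++ t).length) = t.length + 3 := by simp
    rw [hl]
    simp [cpScan,
    show PySem.Dict.get? cpDigits ['t'] = none by decide,
    show PySem.Dict.get? cpDigits ['t','w'] = none by decide,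
    show PySem.Dict.get? cpDigits ['t','w','o'] = some ['2'] by decide]
  · obtain ⟨t, rfl⟩ := (PySem.Chars.startswith_iff _ _).mp h3
    have hl : ((['t','h','r','e','e'] ++ t).length) = t.length + 5 := by simp
    rw [hl]
    simp [cpScan,
    show PySem.Dict.get? cpDigits ['t'] = none by decide,
    show PySem.Dict.get? cpDigits ['t','h'] = none by decide,
    show PySem.Dict.get? cpDigits ['t','h','r'] = none by decide,
    show PySem.Dict.get? cpDigits ['t','h','r','e'] = none by decide,
    show PySem.Dict.get? cpDigits ['t','h','r','e','e'] = some ['3'] by decide]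
  · obtain ⟨t, rfl⟩ := (PySem.Chars.startswith_iff _ _).mp h4
    have hl : ((['f','o','u','r'] ++ t).length) = t.length + 4 := by simp
    rw [hl]
    simp [cpScan,
    show PySem.Dict.get? cpDigits ['f'] = none by decide,
    show PySem.Dict.get? cpDigits ['f','o'] = none by decide,
    show PySem.Dict.get? cpDigits ['f','o','u'] = none by decide,
    show PySem.Dict.get? cpDigits ['f','o','u','r'] = some ['4'] by decide]
  · obtain ⟨t, rfl⟩ := (PySem.Chars.startswith_iff _ _).mp h5
    have hl : ((['f','i','v','e'] ++ t).length) = t.length + 4 := by simp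
    rw [hl]
    simp [cpScan,
    show PySem.Dict.get? cpDigits ['f'] = none by decide,
    show PySem.Dict.get? cpDigits ['f','i'] = none by decide,
    show PySem.Dict.get? cpDigits ['f','i','v'] = none by decide,
    show PySem.Dict.get? cpDigits ['f','i','v','e'] = some ['5'] by decide]
  · obtain ⟨t, rfl⟩ := (PySem.Chars.startswith_iff _ _).mp h6
    have hl : ((['s','i','x'] ++ t).length) = t.length + 3 := by simp
    rw [hl]
    simp [cpScan,
    show PySem.Dict.get? cpDigits ['s'] = none by decide,
    show PySem.Dict.get? cpDigits ['s','i'] = none by decide,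
    show PySem.Dict.get? cpDigits ['s','i','x'] = some ['6'] by decide]
  · obtain ⟨t, rfl⟩ := (PySem.Chars.startswith_iff _ _).mp h7
    have hl : ((['s','e','v','e','n'] ++ t).length) = t.length + 5 := by simp
    rw [hl]
    simp [cpScan,
    show PySem.Dict.get? cpDigits ['s'] = none by decide,
    show PySem.Dict.get? cpDigits ['s','e'] = none by decide,
    show PySem.Dict.get? cpDigits ['s','e','v'] = none by decide,
    show PySem.Dict.get? cpDigits ['s','e','v','e'] = none by decide,
    show PySem.Dict.get? cpDigits ['s','e','v','e','n'] = some ['7'] by decide]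
  · obtain ⟨t, rfl⟩ := (PySem.Chars.startswith_iff _ _).mp h8
    have hl : ((['e','i','g','h','t'] ++ t).length) = t.length + 5 := by simp
    rw [hl]
    simp [cpScan,
    show PySem.Dict.get? cpDigits ['e'] = none by decide,
    show PySem.Dict.get? cpDigits ['e','i'] = none by decide,
    show PySem.Dict.get? cpDigits ['e','i','g'] = none by decide,
    show PySem.Dict.get? cpDigits ['e','i','g','h'] = none by decide,
    show PySem.Dict.get? cpDigits ['e','i','g','h','t'] = some ['8'] by decide]
  · obtain ⟨t, rfl⟩ := (PySem.Chars.startswith_iff _ _).mp h9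
    have hl : ((['n','i','n','e'] ++ t).length) = t.length + 4 := by simp
    rw [hl]
    simp [cpScan,
    show PySem.Dict.get? cpDigits ['n'] = none by decide,
    show PySem.Dict.get? cpDigits ['n','i'] = none by decide,
    show PySem.Dict.get? cpDigits ['n','i','n'] = none by decide,
    show PySem.Dict.get? cpDigits ['n','i','n','e'] = some ['9'] by decide]
  · refine cpScan_none s ?_ _ _
    intro w v hw
    rw [show cpDigits.items = [(['o','n','e'], ['1']), (['t','w','o'], ['2']), (['t','h','r','e','e'], ['3']), (['f','o','u','r'], ['4']), (['f','i','v','e'], ['5']), (['s','i','x'], ['6']), (['s','e','v','e','n'], ['7']), (['e','i','g','h','t'], ['8']), (['n','i','n','e'], ['9'])] by decide] at hw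
    simp only [List.mem_cons, List.not_mem_nil, or_false, Prod.mk.injEq] at hw
    rcases hw with ⟨rfl, rfl⟩ | ⟨rfl, rfl⟩ | ⟨rfl, rfl⟩ | ⟨rfl, rfl⟩ | ⟨rfl, rfl⟩ | ⟨rfl, rfl⟩ | ⟨rfl, rfl⟩ | ⟨rfl, rfl⟩ | ⟨rfl, rfl⟩
    · exact fun hp => h1 ((PySem.Chars.startswith_iff _ _).mpr hp)
    · exact fun hp => h2 ((PySem.Chars.startswith_iff _ _).mpr hp)
    · exact fun hp => h3 ((PySem.Chars.startswith_iff _ _).mpr hp)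
    · exact fun hp => h4 ((PySem.Chars.startswith_iff _ _).mpr hp)
    · exact fun hp => h5 ((PySem.Chars.startswith_iff _ _).mpr hp)
    · exact fun hp => h6 ((PySem.Chars.startswith_iff _ _).mpr hp)
    · exact fun hp => h7 ((PySem.Chars.startswith_iff _ _).mpr hp)
    · exact fun hp => h8 ((PySem.Chars.startswith_iff _ _).mpr hp)
    · exact fun hp => h9 ((PySem.Chars.startswith_iff _ _).mpr hp)

theorem enum_eq (l : List Char) : ∀ s : Nat,
    PySem.List.enumerate l (s : Int) =
      (List.range l.length).map (fun k => (((s + k : Nat) : Int), l.getD k ' ')) := by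
  induction l with
  | nil => intro s; rfl
  | cons x xs ih =>
    intro s
    rw [PySem.List.enumerate_cons]
    have : ((s : Int) + 1) = ((s + 1 : Nat) : Int) := by push_cast; ring
    rw [this, ih (s + 1)]
    simp only [List.length_cons, List.range_succ_eq_map, List.map_cons, List.map_map]
    refine List.cons_eq_cons.mpr ⟨by simp, ?_⟩
    apply List.map_congr_left
    intro k _
    simp only [Function.comp_apply, List.getD_cons_succ]
    congr 1
    omega

theorem inner_eq (l : List Char) (k : Nat) (hk : k ≤ l.length) :
    cpFindA l (k : Int) (PySem.List.pyRange ((k : Int) + 1) ((l.length : Int) + 1)) =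
      cpFindB (l.drop k) cpDigits.items := by
  have h1 : ((k : Int) + 1) = ((k : Int) + ((1 : Nat) : Int)) := by push_cast; ring
  have h2 : ((l.length : Int) + 1) = ((k : Int) + ((1:Nat) : Int) + ((l.length - k : Nat) : Int)) := by
    push_cast [Nat.cast_sub hk]; ring
  rw [h1, h2, cpFindA_eq_cpScan l k (l.length - k) 1]
  rw [show l.length - k = (l.drop k).length by simp]
  exact cpScan_eq_cpFindB (l.drop k)

theorem main_eq (string : String) : custom_parser string = custom_parser_alt string := by
  unfold custom_parser custom_parser_alt
  simp only []
  rw [PySem.List.pyRange_zero_nat, List.foldl_map]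
  rw [show (0 : Int) = ((0 : Nat) : Int) from rfl, enum_eq string.toList 0, List.foldl_map]
  apply PySem.List.foldl_congr_mem
  intro acc k hkmem
  have hk : k < string.toList.length := List.mem_range.mp hkmem
  simp only [Nat.zero_add, PySem.List.pyGet?_natCast]
  rw [List.getElem?_eq_getElem hk, List.getD_eq_getElem?_getD, List.getElem?_eq_getElem hk]
  simp only [Option.getD_some, Int.toNat_natCast]
  rw [inner_eq string.toList k (le_of_lt hk)]

-- ===== VERDICT (by name: the statement is the Claim_ definition above) =====
theorem custom_parser_spec : Claim_equal_custom_parser := by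
  intro string _
  unfold Spec_custom_parser
  exact main_eq string
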